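-- pv_equiv track=rewrite | github.com/JoseMiguel92/mrcp-project | test/solution_grasp_tests.py | get_rcl
-- ===== SOURCE A (Python) =====
-- def get_rcl(mu, node_list, candidates_list):
--     remaining_candidates = sorted(list(set(node_list) & set(candidates_list)))
--     remaining_candidates.reverse()
--     position = 0
--     for candidate in remaining_candidates:
--         if candidate < mu:
--             break
--         else:
--             position += 1
--     return remaining_candidates[:position]
-- ===== SOURCE B (Python) =====
-- def get_rcl(mu, node_list, candidates_list):
--     candidates = set(candidates_list)
--     rcl = []  # kept sorted descending, duplicate-free, at all times
--     for x in node_list: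
--         if x >= mu and x in candidates:
--             lo, hi = 0, len(rcl)
--             while lo < hi:
--                 mid = (lo + hi) // 2
--                 if rcl[mid] > x:
--                     lo = mid + 1
--                 else:
--                     hi = mid
--             if lo == len(rcl) or rcl[lo] != x:
--                 rcl.insert(lo, x)
--     return rcl
-- ===== Notes on version B (the rewrite author's own statement) =====
-- stated objective: alternative
-- what changed: B never calls sort: it makes one pass over node_list, maintaining an always-sorted descending duplicate-free result list, using a hand-written binary search both to find each element's insertion position and to perform the duplicate test, instead of A's build-intersection + ascending sort + reverse + counted prefix scan + slice.
import Mathlib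
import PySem

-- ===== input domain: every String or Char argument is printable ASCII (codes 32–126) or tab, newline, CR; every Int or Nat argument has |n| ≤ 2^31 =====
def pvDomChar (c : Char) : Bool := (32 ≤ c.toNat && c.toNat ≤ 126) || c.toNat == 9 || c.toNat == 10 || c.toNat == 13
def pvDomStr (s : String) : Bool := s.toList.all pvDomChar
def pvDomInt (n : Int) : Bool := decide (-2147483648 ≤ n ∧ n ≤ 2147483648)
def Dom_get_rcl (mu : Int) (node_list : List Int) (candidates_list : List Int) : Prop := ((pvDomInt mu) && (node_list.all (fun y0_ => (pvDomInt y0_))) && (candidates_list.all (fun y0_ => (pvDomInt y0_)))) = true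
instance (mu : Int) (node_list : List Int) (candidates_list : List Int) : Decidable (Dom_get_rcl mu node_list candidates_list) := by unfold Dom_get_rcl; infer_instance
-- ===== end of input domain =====

-- B is sort-free: one pass over node_list keeping an always-sorted descending duplicate-free
-- result by binary-search insertion (the search also does the dedup test), instead of A's
-- sort + reverse + counted-prefix slice (objective: alternative).

-- ===== PORT A =====
-- the 'for candidate in …: if candidate < mu: break else: position += 1' loop (returns the final position)
def pvPosLoop (mu : Int) : List Int → Nat
  | [] => 0
  | c :: rest => if c < mu then 0 else pvPosLoop mu rest + 1

def get_rcl (mu : Int) (node_list : List Int) (candidates_list : List Int) : List Int :=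
  let remaining_candidates :=
    (PySem.List.sorted (PySem.Set.inter (PySem.Set.ofList node_list) (PySem.Set.ofList candidates_list))
      (fun x => x) false).reverse
  let position := pvPosLoop mu remaining_candidates
  PySem.List.slice remaining_candidates none (some (position : Int))

-- ===== PORT B =====
-- the 'lo, hi = 0, len(rcl); while lo < hi: mid = (lo+hi)//2; if rcl[mid] > x: lo = mid+1 else: hi = mid' loop
-- (the none branch is a totality guard only: inside the loop 0 <= mid < hi <= len(rcl), so rcl[mid] is in range)
def pvBisect (x : Int) (rcl : List Int) (lo hi : Nat) : Nat :=
  if _h : lo < hi then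
    let mid := (lo + hi) / 2
    match PySem.List.pyGet? rcl (mid : Int) with
    | some v => if x < v then pvBisect x rcl (mid + 1) hi else pvBisect x rcl lo mid
    | none => lo
  else lo
termination_by hi - lo
decreasing_by all_goals omega

def get_rcl_alt (mu : Int) (node_list : List Int) (candidates_list : List Int) : List Int :=
  let candidates := PySem.Set.ofList candidates_list
  node_list.foldl
    (fun rcl x =>
      if mu ≤ x ∧ x ∈ candidates then
        let lo := pvBisect x rcl 0 rcl.length
        if lo = rcl.length ∨ PySem.List.pyGet? rcl (lo : Int) ≠ some x then
          PySem.List.insert rcl (lo : Int) x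
        else rcl
      else rcl) []

-- ===== PRECONDITION & SPEC =====
def Spec_get_rcl (mu : Int) (node_list : List Int) (candidates_list : List Int) (out : List Int) : Prop := out = get_rcl_alt mu node_list candidates_list
instance (mu : Int) (node_list : List Int) (candidates_list : List Int) (out : List Int) : Decidable (Spec_get_rcl mu node_list candidates_list out) := by unfold Spec_get_rcl; infer_instance

-- ===== CLAIM (what is proved, stated in full; the proofs are below) =====
def Claim_equal_get_rcl : Prop := ∀ (mu : Int) (node_list : List Int) (candidates_list : List Int), Dom_get_rcl mu node_list candidates_list → Spec_get_rcl mu node_list candidates_list (get_rcl mu node_list candidates_list)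

-- ===== LEMMAS AND PROOFS =====

-- A's counting loop counts the takeWhile prefix
theorem pvPosLoop_eq (mu : Int) (l : List Int) :
    pvPosLoop mu l = (l.takeWhile (fun c => !decide (c < mu))).length := by
  induction l with
  | nil => rfl
  | cons c rest ih =>
    by_cases h : c < mu <;> simp [pvPosLoop, List.takeWhile, h, ih]

theorem pvTake_length_takeWhile {α : Type} (p : α → Bool) (l : List α) :
    l.take (l.takeWhile p).length = l.takeWhile p := by
  induction l with
  | nil => rfl
  | cons a rest ih =>
    by_cases h : p a <;> simp [List.takeWhile, h, ih]

-- on a strictly descending list, takeWhile (mu ≤ ·) is filter (mu ≤ ·)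
theorem pvTakeWhile_eq_filter (mu : Int) (l : List Int) (h : l.Pairwise (fun a b => b < a)) :
    l.takeWhile (fun c => !decide (c < mu)) = l.filter (fun x => decide (mu ≤ x)) := by
  induction l with
  | nil => rfl
  | cons a rest ih =>
    rcases List.pairwise_cons.mp h with ⟨ha, hrest⟩
    by_cases hc : a < mu
    · have hnil : rest.filter (fun x => decide (mu ≤ x)) = [] := by
        apply List.filter_eq_nil_iff.mpr
        intro x hx
        have := ha x hx
        simp
        omega
      simp [List.takeWhile, hc, hnil]
    · have hma : mu ≤ a := by omega
      simp [List.takeWhile, hc, ih hrest, hma]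

-- ordered insertion into a descending list (proof-side model of B's search-and-insert step)
def pvInsertDesc (x : Int) : List Int → List Int
  | [] => [x]
  | y :: ys => if x < y then y :: pvInsertDesc x ys else x :: y :: ys

-- insertion is a permutation of consing
theorem pvInsertDesc_perm (x : Int) (l : List Int) : (pvInsertDesc x l).Perm (x :: l) := by
  induction l with
  | nil => rfl
  | cons y ys ih =>
    by_cases h : x < y
    · simpa [pvInsertDesc, h] using ((ih.cons y).trans (List.Perm.swap x y ys))
    · simp [pvInsertDesc, h]

theorem pvInsertDesc_mem (z x : Int) (l : List Int) :
    z ∈ pvInsertDesc x l ↔ z = x ∨ z ∈ l := by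
  simpa using (pvInsertDesc_perm x l).mem_iff

-- insertion keeps the list strictly descending when x is new
theorem pvInsertDesc_pairwise (x : Int) (l : List Int)
    (h : l.Pairwise (fun a b => b < a)) (hx : x ∉ l) :
    (pvInsertDesc x l).Pairwise (fun a b => b < a) := by
  induction l with
  | nil => simp [pvInsertDesc]
  | cons y ys ih =>
    rcases List.pairwise_cons.mp h with ⟨hy, hys⟩
    have hxy : x ≠ y := by intro e; exact hx (e ▸ List.mem_cons_self)
    have hxys : x ∉ ys := fun m => hx (List.mem_cons_of_mem _ m)
    by_cases hlt : x < y
    · rw [pvInsertDesc, if_pos hlt]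
      refine List.pairwise_cons.mpr ⟨?_, ih hys hxys⟩
      intro z hz
      rcases (pvInsertDesc_mem z x ys).mp hz with rfl | hz'
      · exact hlt
      · exact hy z hz'
    · have hyx : y < x := by omega
      rw [pvInsertDesc, if_neg hlt]
      refine List.pairwise_cons.mpr ⟨?_, h⟩
      intro z hz
      rcases List.mem_cons.mp hz with rfl | hz'
      · exact hyx
      · exact lt_trans (hy z hz') hyx

-- pvInsertDesc splits at the maximal prefix of entries greater than x
theorem pvInsertDesc_split (x : Int) (l : List Int) :
    pvInsertDesc x l =
      l.takeWhile (fun y => decide (x < y)) ++ x :: l.dropWhile (fun y => decide (x < y)) := by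
  induction l with
  | nil => rfl
  | cons y ys ih =>
    by_cases h : x < y <;> simp [pvInsertDesc, List.takeWhile, List.dropWhile, h, ih]

-- the entry just past a takeWhile prefix fails the predicate
theorem pvGet_takeWhile_len {α : Type} (p : α → Bool) (l : List α)
    (h : (l.takeWhile p).length < l.length) :
    p (l[(l.takeWhile p).length]'h) = false := by
  induction l with
  | nil => simp at h
  | cons a t ih =>
    by_cases hp : p a
    · have h' : (t.takeWhile p).length < t.length := by
        simpa [List.takeWhile, hp] using h
      simpa [List.takeWhile, hp] using ih h'
    · simp [List.takeWhile, hp]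

-- an index is inside the takeWhile prefix of a strictly descending list iff its entry is > x
theorem pvIdx_lt_takeWhile_iff (x : Int) (l : List Int)
    (hd : l.Pairwise (fun a b => b < a)) (i : Nat) (hi : i < l.length) :
    i < (l.takeWhile (fun y => decide (x < y))).length ↔ x < l[i]'hi := by
  set p : Int → Bool := fun y => decide (x < y) with hp
  set t := (l.takeWhile p).length with ht
  have htle : t ≤ l.length := by
    simpa [ht] using (List.takeWhile_sublist (l := l) (p := p)).length_le
  constructor
  · intro h
    have hi' : i < (l.take t).length := by simp [List.length_take]; omega
    have hm : (l.take t)[i]'hi' ∈ l.take t := List.getElem_mem hi'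
    have e : (l.take t)[i]'hi' = l[i]'hi := List.getElem_take
    rw [e, pvTake_length_takeWhile p l] at hm
    have := List.mem_takeWhile_imp hm
    simpa [hp] using this
  · intro hxl
    by_contra hnot
    have hti : t ≤ i := by omega
    have htlen : t < l.length := by omega
    have hfail : p (l[t]'htlen) = false := pvGet_takeWhile_len p l htlen
    have hlt : l[t]'htlen ≤ x := by
      have : ¬ (x < l[t]'htlen) := by simpa [hp] using hfail
      omega
    rcases Nat.eq_or_lt_of_le hti with rfl | hlt'
    · omega
    · have h2 : l[i]'hi < l[t]'htlen := by
        simpa using (List.pairwise_iff_getElem.mp hd) t i htlen hi hlt'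
      omega

-- the binary search returns the length of the > x prefix of a strictly descending list
theorem pvBisect_eq (x : Int) (l : List Int) (hd : l.Pairwise (fun a b => b < a)) :
    ∀ lo hi, lo ≤ (l.takeWhile (fun y => decide (x < y))).length →
      (l.takeWhile (fun y => decide (x < y))).length ≤ hi → hi ≤ l.length →
      pvBisect x l lo hi = (l.takeWhile (fun y => decide (x < y))).length := by
  intro lo hi
  induction hn : hi - lo using Nat.strong_induction_on generalizing lo hi with
  | _ n ih =>
    intro h1 h2 h3
    set t := (l.takeWhile (fun y => decide (x < y))).length with ht
    by_cases hlh : lo < hi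
    · have hmid : (lo + hi) / 2 < l.length := by omega
      rw [pvBisect, dif_pos hlh]
      have hget : PySem.List.pyGet? l (((lo + hi) / 2 : Nat) : Int) = some (l[(lo + hi) / 2]'hmid) := by
        rw [PySem.List.pyGet?_natCast]; exact List.getElem?_eq_getElem hmid
      simp only [hget]
      by_cases hcmp : x < l[(lo + hi) / 2]'hmid
      · rw [if_pos hcmp]
        have hlt : (lo + hi) / 2 < t := (pvIdx_lt_takeWhile_iff x l hd _ hmid).mpr hcmp
        exact ih (hi - ((lo + hi) / 2 + 1)) (by omega) _ _ rfl (by omega) h2 h3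
      · rw [if_neg hcmp]
        have hge : ¬ ((lo + hi) / 2 < t) := fun hc =>
          hcmp ((pvIdx_lt_takeWhile_iff x l hd _ hmid).mp hc)
        exact ih ((lo + hi) / 2 - lo) (by omega) _ _ rfl h1 (by omega) (by omega)
    · rw [pvBisect, dif_neg hlh]
      omega

-- membership test via the search result: x sits exactly at the end of the > x prefix, if anywhere
theorem pvMem_iff_get (x : Int) (l : List Int) (hd : l.Pairwise (fun a b => b < a)) :
    ((l.takeWhile (fun y => decide (x < y))).length = l.length ∨
      PySem.List.pyGet? l (((l.takeWhile (fun y => decide (x < y))).length : Nat) : Int) ≠ some x) ↔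
    x ∉ l := by
  set p : Int → Bool := fun y => decide (x < y) with hp
  set t := (l.takeWhile p).length with ht
  have htle : t ≤ l.length := by
    simpa [ht] using (List.takeWhile_sublist (l := l) (p := p)).length_le
  by_cases hcase : t = l.length
  · -- the whole list is > x, so x is not in it
    have hnot : x ∉ l := by
      intro hm
      rcases List.getElem_of_mem hm with ⟨i, hi, he⟩
      have := (pvIdx_lt_takeWhile_iff x l hd i hi).mp (by rw [← ht]; omega)
      omega
    simp [hcase, hnot]
  · have htlen : t < l.length := by omega
    have hget : PySem.List.pyGet? l ((t : Nat) : Int) = some (l[t]'htlen) := by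
      rw [PySem.List.pyGet?_natCast]; exact List.getElem?_eq_getElem htlen
    have hfail : p (l[t]'htlen) = false := pvGet_takeWhile_len p l htlen
    have hle : l[t]'htlen ≤ x := by
      have : ¬ (x < l[t]'htlen) := by simpa [hp] using hfail
      omega
    constructor
    · rintro (h | h)
      · omega
      · intro hm
        rcases List.getElem_of_mem hm with ⟨i, hi, he⟩
        have hnotlt : ¬ (i < t) := fun hc => by
          have := (pvIdx_lt_takeWhile_iff x l hd i hi).mp hc
          omega
        rcases Nat.eq_or_lt_of_le (Nat.le_of_not_lt hnotlt) with rfl | hlt'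
        · exact h (by rw [hget, he])
        · have := (List.pairwise_iff_getElem.mp hd) t i htlen hi hlt'
          omega
    · intro hm
      right
      rw [hget]
      intro hc
      exact hm (by
        have : l[t]'htlen = x := by simpa using hc
        exact this ▸ List.getElem_mem htlen)

-- Python's rcl.insert(lo, x) at the search position is exactly the ordered insertion
theorem pvInsert_at_t (x : Int) (l : List Int) :
    PySem.List.insert l (((l.takeWhile (fun y => decide (x < y))).length : Nat) : Int) x =
      pvInsertDesc x l := by
  set p : Int → Bool := fun y => decide (x < y) with hp
  set t := (l.takeWhile p).length with ht
  have htle : t ≤ l.length := by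
    simpa [ht] using (List.takeWhile_sublist (l := l) (p := p)).length_le
  have h2 : l.drop t = l.dropWhile p := by
    conv_lhs => rw [← List.takeWhile_append_dropWhile (p := p) (l := l)]
    exact List.drop_left' ht.symm
  rw [PySem.List.insert_natCast l t x htle, pvInsertDesc_split, h2, ht,
    pvTake_length_takeWhile]

-- B's step on a strictly descending accumulator is the plain ordered-insertion step
theorem pvStep_eq (mu x : Int) (cl : List Int) (rcl : List Int)
    (hd : rcl.Pairwise (fun a b => b < a)) :
    (if mu ≤ x ∧ x ∈ PySem.Set.ofList cl then
        if pvBisect x rcl 0 rcl.length = rcl.length ∨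
            PySem.List.pyGet? rcl ((pvBisect x rcl 0 rcl.length : Nat) : Int) ≠ some x then
          PySem.List.insert rcl ((pvBisect x rcl 0 rcl.length : Nat) : Int) x
        else rcl
      else rcl) =
    (if mu ≤ x ∧ x ∈ cl ∧ x ∉ rcl then pvInsertDesc x rcl else rcl) := by
  set t := (rcl.takeWhile (fun y => decide (x < y))).length with ht
  have htle : t ≤ rcl.length := by
    simpa [ht] using (List.takeWhile_sublist (l := rcl) (p := fun y => decide (x < y))).length_le
  by_cases hg : mu ≤ x ∧ x ∈ PySem.Set.ofList cl
  · obtain ⟨hmu, hcl⟩ := hg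
    have hcl' : x ∈ cl := (PySem.Set.mem_ofList cl x).mp hcl
    have hbs : pvBisect x rcl 0 rcl.length = t :=
      pvBisect_eq x rcl hd 0 rcl.length (by omega) htle le_rfl
    rw [if_pos ⟨hmu, hcl⟩, hbs, ht]
    by_cases hx : x ∈ rcl
    · rw [if_neg (fun hc => (pvMem_iff_get x rcl hd).mp hc hx),
        if_neg (by rintro ⟨_, _, hnx⟩; exact hnx hx)]
    · rw [if_pos ((pvMem_iff_get x rcl hd).mpr hx),
        if_pos ⟨hmu, hcl', hx⟩, pvInsert_at_t]
  · rw [if_neg hg, if_neg (by rintro ⟨h1, h2, _⟩; exact hg ⟨h1, (PySem.Set.mem_ofList cl x).mpr h2⟩)]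

-- the plain step keeps the accumulator strictly descending
theorem pvStep_pairwise (mu x : Int) (cl : List Int) (rcl : List Int)
    (hd : rcl.Pairwise (fun a b => b < a)) :
    (if mu ≤ x ∧ x ∈ cl ∧ x ∉ rcl then pvInsertDesc x rcl else rcl).Pairwise
      (fun a b => b < a) := by
  by_cases h : mu ≤ x ∧ x ∈ cl ∧ x ∉ rcl
  · rw [if_pos h]; exact pvInsertDesc_pairwise x rcl hd h.2.2
  · rwa [if_neg h]

-- B's fold with the binary search replaced by the ordered-insertion step
theorem get_rcl_alt_eq_plain (mu : Int) (nl cl : List Int) :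
    get_rcl_alt mu nl cl =
      nl.foldl (fun rcl x =>
        if mu ≤ x ∧ x ∈ cl ∧ x ∉ rcl then pvInsertDesc x rcl else rcl) [] := by
  show nl.foldl _ [] = _
  have main : ∀ (l acc : List Int), acc.Pairwise (fun a b => b < a) →
      l.foldl (fun rcl x =>
        if mu ≤ x ∧ x ∈ PySem.Set.ofList cl then
          if pvBisect x rcl 0 rcl.length = rcl.length ∨
              PySem.List.pyGet? rcl ((pvBisect x rcl 0 rcl.length : Nat) : Int) ≠ some x then
            PySem.List.insert rcl ((pvBisect x rcl 0 rcl.length : Nat) : Int) x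
          else rcl
        else rcl) acc =
      l.foldl (fun rcl x =>
        if mu ≤ x ∧ x ∈ cl ∧ x ∉ rcl then pvInsertDesc x rcl else rcl) acc := by
    intro l
    induction l with
    | nil => intro acc _; rfl
    | cons x xs ih =>
      intro acc hacc
      rw [List.foldl_cons, List.foldl_cons, pvStep_eq mu x cl acc hacc]
      exact ih _ (pvStep_pairwise mu x cl acc hacc)
  exact main nl [] (by simp)

-- the fold's invariant: strictly descending, and membership is
-- "already in the accumulator, or comes from the processed part of node_list"
theorem pvFoldB_invariant (mu : Int) (cl : List Int) (l : List Int) :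
    ∀ acc : List Int, acc.Pairwise (fun a b => b < a) →
      (l.foldl (fun rcl x =>
          if mu ≤ x ∧ x ∈ cl ∧ x ∉ rcl then pvInsertDesc x rcl else rcl) acc).Pairwise
        (fun a b => b < a) ∧
      ∀ z, z ∈ l.foldl (fun rcl x =>
          if mu ≤ x ∧ x ∈ cl ∧ x ∉ rcl then pvInsertDesc x rcl else rcl) acc ↔
        z ∈ acc ∨ (z ∈ l ∧ z ∈ cl ∧ mu ≤ z) := by
  induction l with
  | nil => intro acc h; simpa using h
  | cons x xs ih =>
    intro acc hacc
    rw [List.foldl_cons]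
    by_cases hc : mu ≤ x ∧ x ∈ cl ∧ x ∉ acc
    · obtain ⟨hmu, hxcl, hxacc⟩ := hc
      rw [if_pos ⟨hmu, hxcl, hxacc⟩]
      have step := ih (pvInsertDesc x acc) (pvInsertDesc_pairwise x acc hacc hxacc)
      refine ⟨step.1, ?_⟩
      intro z
      rw [step.2 z, pvInsertDesc_mem]
      constructor
      · rintro ((rfl | h) | ⟨h1, h2, h3⟩)
        · exact Or.inr ⟨List.mem_cons_self, hxcl, hmu⟩
        · exact Or.inl h
        · exact Or.inr ⟨List.mem_cons_of_mem _ h1, h2, h3⟩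
      · rintro (h | ⟨h1, h2, h3⟩)
        · exact Or.inl (Or.inr h)
        · rcases List.mem_cons.mp h1 with rfl | h1'
          · exact Or.inl (Or.inl rfl)
          · exact Or.inr ⟨h1', h2, h3⟩
    · rw [if_neg hc]
      have step := ih acc hacc
      refine ⟨step.1, ?_⟩
      intro z
      rw [step.2 z]
      constructor
      · rintro (h | ⟨h1, h2, h3⟩)
        · exact Or.inl h
        · exact Or.inr ⟨List.mem_cons_of_mem _ h1, h2, h3⟩
      · rintro (h | ⟨h1, h2, h3⟩)
        · exact Or.inl h
        · rcases List.mem_cons.mp h1 with rfl | h1'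
          · -- z = x: the guard failed, so mu > x, x ∉ cl, or x ∈ acc
            by_cases hza : z ∈ acc
            · exact Or.inl hza
            · exact absurd ⟨h3, h2, hza⟩ hc
          · exact Or.inr ⟨h1', h2, h3⟩

-- two strictly descending lists with the same members are equal
theorem pvDescExt (l₁ : List Int) : ∀ l₂ : List Int,
    l₁.Pairwise (fun a b => b < a) → l₂.Pairwise (fun a b => b < a) →
    (∀ z, z ∈ l₁ ↔ z ∈ l₂) → l₁ = l₂ := by
  induction l₁ with
  | nil =>
    intro l₂ _ _ hm
    cases l₂ with
    | nil => rfl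
    | cons b t => exact absurd ((hm b).mpr List.mem_cons_self) (by simp)
  | cons a t₁ ih =>
    intro l₂ h₁ h₂ hm
    cases l₂ with
    | nil => exact absurd ((hm a).mp List.mem_cons_self) (by simp)
    | cons b t₂ =>
      rcases List.pairwise_cons.mp h₁ with ⟨ha, ht₁⟩
      rcases List.pairwise_cons.mp h₂ with ⟨hb, ht₂⟩
      have hab : a = b := by
        rcases List.mem_cons.mp ((hm a).mp List.mem_cons_self) with rfl | hat₂
        · rfl
        · have h1 : a < b := hb a hat₂
          rcases List.mem_cons.mp ((hm b).mpr List.mem_cons_self) with rfl | hbt₁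
          · rfl
          · exact absurd (ha b hbt₁) (by omega)
      subst hab
      have : t₁ = t₂ := by
        apply ih t₂ ht₁ ht₂
        intro z
        constructor
        · intro hz
          rcases List.mem_cons.mp ((hm z).mp (List.mem_cons_of_mem _ hz)) with rfl | h
          · exact absurd (ha z hz) (by omega)
          · exact h
        · intro hz
          rcases List.mem_cons.mp ((hm z).mpr (List.mem_cons_of_mem _ hz)) with rfl | h
          · exact absurd (hb z hz) (by omega)
          · exact h
      rw [this]

-- A's result is the filter of the descending sorted intersection
theorem get_rcl_eq_filter (mu : Int) (node_list candidates_list : List Int) :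
    get_rcl mu node_list candidates_list =
      ((PySem.List.sorted (PySem.Set.inter (PySem.Set.ofList node_list) (PySem.Set.ofList candidates_list))
        (fun x => x) false).reverse).filter (fun x => decide (mu ≤ x)) := by
  have hnd : (PySem.Set.inter (PySem.Set.ofList node_list) (PySem.Set.ofList candidates_list)).Nodup :=
    PySem.Set.nodup_inter _ _ (PySem.Set.nodup_ofList node_list)
  set S := PySem.Set.inter (PySem.Set.ofList node_list) (PySem.Set.ofList candidates_list) with hS
  set asc := PySem.List.sorted S (fun x => x) false with hasc
  have hpw : asc.Pairwise (fun a b : Int => a < b) := by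
    have := PySem.List.sorted_ofList_pairwise_lt (xs := S)
    rwa [PySem.Set.ofList_eq_self_of_nodup S hnd] at this
  have hpwrev : asc.reverse.Pairwise (fun a b : Int => b < a) := by
    rw [List.pairwise_reverse]; exact hpw
  show PySem.List.slice asc.reverse none (some ((pvPosLoop mu asc.reverse : Nat) : Int)) = _
  rw [pvPosLoop_eq, PySem.List.slice_to_natCast, pvTake_length_takeWhile,
    pvTakeWhile_eq_filter mu _ hpwrev]

theorem get_rcl_eq_alt (mu : Int) (node_list candidates_list : List Int) :
    get_rcl mu node_list candidates_list = get_rcl_alt mu node_list candidates_list := by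
  set S := PySem.Set.inter (PySem.Set.ofList node_list) (PySem.Set.ofList candidates_list) with hS
  have hnd : S.Nodup := PySem.Set.nodup_inter _ _ (PySem.Set.nodup_ofList node_list)
  set asc := PySem.List.sorted S (fun x => x) false with hasc
  have hpw : asc.Pairwise (fun a b : Int => a < b) := by
    have := PySem.List.sorted_ofList_pairwise_lt (xs := S)
    rwa [PySem.Set.ofList_eq_self_of_nodup S hnd] at this
  have hpwrev : asc.reverse.Pairwise (fun a b : Int => b < a) := by
    rw [List.pairwise_reverse]; exact hpw
  have hB := pvFoldB_invariant mu candidates_list node_list [] (by simp)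
  rw [get_rcl_eq_filter mu node_list candidates_list, get_rcl_alt_eq_plain, ← hS, ← hasc]
  apply pvDescExt
  · exact List.Pairwise.filter _ hpwrev
  · exact hB.1
  · intro z
    rw [hB.2 z]
    simp only [List.mem_filter, List.mem_reverse, List.not_mem_nil, false_or]
    rw [hasc, PySem.List.mem_sorted, hS, PySem.Set.mem_inter,
      PySem.Set.mem_ofList, PySem.Set.mem_ofList]
    constructor
    · rintro ⟨⟨h1, h2⟩, h3⟩; exact ⟨h1, h2, by simpa using h3⟩
    · rintro ⟨h1, h2, h3⟩; exact ⟨⟨h1, h2⟩, by simpa using h3⟩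

-- ===== VERDICT (by name: the statement is the Claim_ definition above) =====
theorem get_rcl_spec : Claim_equal_get_rcl := by
  intro mu nl cl _
  unfold Spec_get_rcl
  exact get_rcl_eq_alt mu nl cl
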